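-- pv_equiv track=rewrite | github.com/scharch/SONAR | lineage/2.4-cluster_into_groups.py | iterator_slice
-- ===== SOURCE A (Python) =====
-- import itertools
--
-- def iterator_slice(iterator, length):
-- 	iterator = iter(iterator)
-- 	slice = 0
-- 	while True:
-- 		res = tuple(itertools.islice(iterator, length))
-- 		if not res:
-- 			break
-- 		slice += 1
-- 		yield slice, res
-- ===== SOURCE B (Python) =====
-- def iterator_slice(iterator, length):
--     if length < 0:
--         raise ValueError("length must be non-negative")
--     if length == 0:
--         return
--     buf = []
--     count = 0
--     for x in iterator:
--         buf.append(x)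
--         if len(buf) == length:
--             count += 1
--             yield count, tuple(buf)
--             buf = []
--     if buf:
--         count += 1
--         yield count, tuple(buf)
-- ===== Notes on version B (the rewrite author's own statement) =====
-- stated objective: alternative
-- what changed: B replaces the repeated itertools.islice fetches with a single element-by-element pass that maintains a growing buffer, emitting a numbered chunk each time the buffer fills and a final partial chunk after the loop.
import Mathlib
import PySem

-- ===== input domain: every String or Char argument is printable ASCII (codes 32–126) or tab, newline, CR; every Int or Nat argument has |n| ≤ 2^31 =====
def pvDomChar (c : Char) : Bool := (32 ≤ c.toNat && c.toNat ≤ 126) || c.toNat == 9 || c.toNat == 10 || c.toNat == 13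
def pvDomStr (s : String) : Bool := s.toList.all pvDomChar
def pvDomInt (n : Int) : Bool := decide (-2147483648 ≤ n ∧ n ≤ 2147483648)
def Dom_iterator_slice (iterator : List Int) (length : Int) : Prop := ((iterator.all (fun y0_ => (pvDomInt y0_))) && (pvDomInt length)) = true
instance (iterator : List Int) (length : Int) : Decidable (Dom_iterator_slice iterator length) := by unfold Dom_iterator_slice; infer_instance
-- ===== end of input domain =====

-- ===== PORT A =====
-- B replaces A's repeated islice fetches by one element-wise pass with a buffer (alternative decomposition).
-- A: while True: res = tuple(islice(iterator, length)); break if empty; yield (slice, res).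
-- islice's negative-length ValueError is excluded by Pre_ (length < 0); there the port uses .toNat harmlessly.
def iterator_sliceLoop (it : List Int) (len : Nat) (slice : Int) : List (Int × List Int) :=
  if len = 0 then []
  else if h : it = [] then []
  else (slice + 1, it.take len) :: iterator_sliceLoop (it.drop len) len (slice + 1)
termination_by it.length
decreasing_by
  simp only [List.length_drop]
  have : 0 < it.length := List.length_pos_iff.mpr h
  omega

def iterator_slice (iterator : List Int) (length : Int) : List (Int × List Int) :=
  iterator_sliceLoop iterator length.toNat 0

-- ===== PORT B =====
-- for x in iterator: buf.append(x); if len(buf)==length: count+=1; yield (count, buf); buf=[]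
-- after loop: if buf: count+=1; yield (count, buf)
def iterator_sliceAltLoop (it : List Int) (len : Nat) (buf : List Int) (count : Int) : List (Int × List Int) :=
  match it with
  | [] => if buf ≠ [] then [(count + 1, buf)] else []
  | x :: rest =>
      let buf' := buf ++ [x]
      if buf'.length = len then
        (count + 1, buf') :: iterator_sliceAltLoop rest len [] (count + 1)
      else
        iterator_sliceAltLoop rest len buf' count

def iterator_slice_alt (iterator : List Int) (length : Int) : List (Int × List Int) :=
  if length = 0 then []
  else iterator_sliceAltLoop iterator length.toNat [] 0

-- ===== PRECONDITION & SPEC =====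
-- Pre_ excludes length < 0, on which A raises ValueError (islice does not accept negative stops).
def Pre_iterator_slice (iterator : List Int) (length : Int) : Prop := 0 ≤ length
instance (iterator : List Int) (length : Int) : Decidable (Pre_iterator_slice iterator length) := by unfold Pre_iterator_slice; infer_instance
def pvWitness_iterator_slice : List Int × Int := ([1, 2, 3, 4, 5], 2)

def Spec_iterator_slice (iterator : List Int) (length : Int) (out : List (Int × List Int)) : Prop := out = iterator_slice_alt iterator length
instance (iterator : List Int) (length : Int) (out : List (Int × List Int)) : Decidable (Spec_iterator_slice iterator length out) := by unfold Spec_iterator_slice; infer_instance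

-- ===== CLAIM (what is proved, stated in full; the proofs are below) =====
def Claim_equal_iterator_slice : Prop := ∀ (iterator : List Int) (length : Int), Dom_iterator_slice iterator length → Pre_iterator_slice iterator length → Spec_iterator_slice iterator length (iterator_slice iterator length)

-- ===== LEMMAS AND PROOFS =====
-- Invariant: with a partial buffer (shorter than len), B's pass from (buf, count)
-- computes exactly A's chunking of buf ++ it starting at slice counter = count.
theorem altLoop_eq_loop (len : Nat) (hlen : 0 < len) :
    ∀ (it buf : List Int) (count : Int), buf.length < len →
      iterator_sliceAltLoop it len buf count = iterator_sliceLoop (buf ++ it) len count := by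
  intro it
  induction it with
  | nil =>
      intro buf count hb
      by_cases hbuf : buf = []
      · subst hbuf
        simp [iterator_sliceAltLoop, iterator_sliceLoop, Nat.pos_iff_ne_zero.mp hlen]
      · rw [iterator_sliceLoop]
        simp [iterator_sliceAltLoop, hbuf, Nat.pos_iff_ne_zero.mp hlen,
              List.take_of_length_le (Nat.le_of_lt hb),
              List.drop_eq_nil_of_le (Nat.le_of_lt hb), iterator_sliceLoop]
  | cons x rest ih =>
      intro buf count hb
      rw [iterator_sliceAltLoop]
      by_cases hfull : (buf ++ [x]).length = len
      · rw [if_pos hfull]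
        have hne : buf ++ x :: rest ≠ [] := by simp
        have hsplit : buf ++ x :: rest = (buf ++ [x]) ++ rest := by simp
        have htake : (buf ++ x :: rest).take len = buf ++ [x] := by
          rw [hsplit, ← hfull, List.take_left]
        have hdrop : (buf ++ x :: rest).drop len = rest := by
          rw [hsplit, ← hfull, List.drop_left]
        conv_rhs => rw [iterator_sliceLoop]
        rw [if_neg (Nat.pos_iff_ne_zero.mp hlen), dif_neg hne, htake, hdrop]
        rw [ih [] (count + 1) hlen]
        simp
      · rw [if_neg hfull]
        have hlt : (buf ++ [x]).length < len := by
          simp only [List.length_append, List.length_cons, List.length_nil] at *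
          omega
        rw [ih (buf ++ [x]) count hlt]
        simp

-- ===== VERDICT (by name: the statement is the Claim_ definition above) =====
theorem iterator_slice_spec : Claim_equal_iterator_slice := by
  intro iterator length _ hpre
  unfold Spec_iterator_slice iterator_slice iterator_slice_alt
  by_cases h0 : length = 0
  · subst h0
    rw [iterator_sliceLoop]
    simp
  · rw [if_neg h0]
    have hlen : 0 < length.toNat := by
      unfold Pre_iterator_slice at hpre
      omega
    rw [altLoop_eq_loop length.toNat hlen iterator [] 0 hlen]
    simp
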